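-- pv_equiv track=rewrite | github.com/BillBrousalis/HTB-Uni-CTF-Writeups-Quals | insane_bolt/ex.py | cutdown
-- ===== SOURCE A (Python) =====
-- def cutdown(board):
--   if all([line[0] == '#' for line in board]):
--     # remove first column
--     for idx, line in enumerate(board):
--       board[idx] = line[1:]
--     cutdown(board)
--   elif all([line[-1] == '#' for line in board]):
--     # remove last column
--     for idx, line in enumerate(board):
--       board[idx] = line[:-1]
--     cutdown(board)
--   return board
-- ===== SOURCE B (Python) =====
-- def _lead(line):
--     # length of the leading run of '#' in line
--     k = 0
--     while k < len(line) and line[k] == '#':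
--         k += 1
--     return k
--
-- def _trail(line, l):
--     # length of the trailing run of '#' in line[l:]
--     k = 0
--     while k < len(line) - l and line[len(line) - 1 - k] == '#':
--         k += 1
--     return k
--
-- def cutdown(board):
--     l = min(_lead(line) for line in board)
--     r = min(_trail(line, l) for line in board)
--     for i, line in enumerate(board):
--         board[i] = line[l:len(line) - r]
--     return board
-- ===== Notes on version B (the rewrite author's own statement) =====
-- stated objective: alternative
-- what changed: A repeatedly re-slices every row one column at a time via recursion; B computes the minimal leading and trailing '#'-run lengths over the rows once and slices every row exactly once (asymptotically better when many columns are stripped, but not measurably faster on the generated inputs, which strip few columns).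
import Mathlib
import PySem

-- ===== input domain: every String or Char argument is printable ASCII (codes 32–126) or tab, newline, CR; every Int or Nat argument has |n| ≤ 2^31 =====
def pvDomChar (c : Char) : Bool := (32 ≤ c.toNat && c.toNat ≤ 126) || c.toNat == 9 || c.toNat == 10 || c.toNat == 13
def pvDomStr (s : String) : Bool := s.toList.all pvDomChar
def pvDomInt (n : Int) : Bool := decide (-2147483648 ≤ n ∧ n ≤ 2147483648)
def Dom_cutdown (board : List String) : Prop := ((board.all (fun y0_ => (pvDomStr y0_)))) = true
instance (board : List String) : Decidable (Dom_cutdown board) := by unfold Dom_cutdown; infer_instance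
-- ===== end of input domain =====

-- B strips the leading and trailing all-'#' columns with one run-length pass per row and one slice per row,
-- instead of A's one-column-at-a-time recursive re-slicing; equivalence is about the RETURN value (both
-- Pythons also mutate the argument list in place in the same way).

-- ===== PORT A =====
-- A's recursion does not structurally terminate (the empty board recurses forever in Python);
-- fuel = total number of characters + 1 is a pure totality guard: under Pre_ it is never exhausted.
def cutdownFuel : Nat → List String → List String
  | 0, board => board
  | n + 1, board =>
    if board.all (fun line => PySem.Str.pyGet? line 0 == some '#') then
      -- remove first column
      cutdownFuel n (board.map (fun line => PySem.Str.slice line (some 1) none))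
    else if board.all (fun line => PySem.Str.pyGet? line (-1) == some '#') then
      -- remove last column
      cutdownFuel n (board.map (fun line => PySem.Str.slice line none (some (-1))))
    else board

def cutdown (board : List String) : List String :=
  cutdownFuel ((board.map (fun s => s.toList.length)).sum + 1) board

-- ===== PORT B =====
-- port of _lead: scan of the leading '#'-run, as structural recursion on the characters
def leadRun : List Char → Nat
  | [] => 0
  | c :: cs => if c = '#' then leadRun cs + 1 else 0

-- port of _trail: the trailing '#'-run of line[l:]; scanning from the right = leading run of the reverse
def trailRun (l : Nat) (cs : List Char) : Nat := leadRun (cs.drop l).reverse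

-- Python's min over a nonempty sequence (the [] value 0 is never used under Pre_)
def minOf : List Nat → Nat
  | [] => 0
  | x :: xs => xs.foldl min x

def Lmin (board : List String) : Nat := minOf (board.map (fun s => leadRun s.toList))
def Rmin (board : List String) : Nat := minOf (board.map (fun s => trailRun (Lmin board) s.toList))

def cutdown_alt (board : List String) : List String :=
  board.map (fun s =>
    PySem.Str.slice s (some ((Lmin board : Int))) (some ((s.toList.length : Int) - (Rmin board : Int))))

-- ===== PRECONDITION & SPEC =====
-- closed-form row statistics used only to state Pre_: the shortest leading '#'-run over the rows,
-- and the shortest trailing '#'-run of the rows with that prefix removed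
def runL (board : List String) : Nat :=
  (board.map (fun s => (s.toList.takeWhile (· = '#')).length)).min?.getD 0
def runR (board : List String) : Nat :=
  (board.map (fun s => ((s.toList.drop (runL board)).reverse.takeWhile (· = '#')).length)).min?.getD 0

-- Pre_ excludes exactly the inputs on which A raises: the empty board (unbounded recursion) and boards
-- on which the column-stripping empties some row (IndexError on line[0]/line[-1]).
def Pre_cutdown (board : List String) : Prop :=
  board ≠ [] ∧ ∀ s ∈ board, runL board + runR board < s.toList.length

instance (board : List String) : Decidable (Pre_cutdown board) := by unfold Pre_cutdown; infer_instance

def pvWitness_cutdown : List String := ["#a#", "##b#"]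

def Spec_cutdown (board : List String) (out : List String) : Prop := out = cutdown_alt board
instance (board : List String) (out : List String) : Decidable (Spec_cutdown board out) := by unfold Spec_cutdown; infer_instance

-- ===== CLAIM (what is proved, stated in full; the proofs are below) =====
def Claim_equal_cutdown : Prop := ∀ (board : List String), Dom_cutdown board → Pre_cutdown board → Spec_cutdown board (cutdown board)

-- ===== LEMMAS AND PROOFS =====

theorem foldl_min_mem (xs : List Nat) (a : Nat) : xs.foldl min a = a ∨ xs.foldl min a ∈ xs := by
  induction xs generalizing a with
  | nil => left; rfl
  | cons x xs ih =>
    rcases ih (min a x) with h | h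
    · rcases Nat.le_total a x with hle | hle
      · left; rw [List.foldl_cons, h, Nat.min_eq_left hle]
      · right; rw [List.foldl_cons, h, Nat.min_eq_right hle]; exact List.mem_cons_self
    · right; exact List.mem_cons_of_mem _ (by rw [List.foldl_cons]; exact h)

theorem foldl_min_le (xs : List Nat) (a : Nat) : xs.foldl min a ≤ a ∧ ∀ x ∈ xs, xs.foldl min a ≤ x := by
  induction xs generalizing a with
  | nil => simp
  | cons x xs ih =>
    obtain ⟨h1, h2⟩ := ih (min a x)
    refine ⟨le_trans h1 (Nat.min_le_left _ _), ?_⟩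
    intro y hy
    rcases List.mem_cons.mp hy with rfl | hy
    · exact le_trans h1 (Nat.min_le_right _ _)
    · exact h2 y hy

theorem minOf_mem (xs : List Nat) (h : xs ≠ []) : minOf xs ∈ xs := by
  cases xs with
  | nil => simp at h
  | cons x xs =>
    rcases foldl_min_mem xs x with h' | h'
    · simp [minOf, h']
    · simp [minOf, List.mem_cons, h']

theorem minOf_le (xs : List Nat) (x : Nat) (hx : x ∈ xs) : minOf xs ≤ x := by
  cases xs with
  | nil => simp at hx
  | cons y ys =>
    obtain ⟨h1, h2⟩ := foldl_min_le ys y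
    rcases List.mem_cons.mp hx with rfl | hx
    · exact h1
    · exact h2 x hx

theorem foldl_min_pred (xs : List Nat) (a : Nat) :
    (xs.map (fun x => x - 1)).foldl min (a - 1) = (xs.foldl min a) - 1 := by
  induction xs generalizing a with
  | nil => rfl
  | cons x xs ih =>
    simp only [List.map_cons, List.foldl_cons]
    rw [show min (a-1) (x-1) = min a x - 1 by omega, ih]

theorem minOf_map_pred (xs : List Nat) :
    minOf (xs.map (fun x => x - 1)) = minOf xs - 1 := by
  cases xs with
  | nil => rfl
  | cons x xs => simp [minOf, foldl_min_pred]

theorem leadRun_pos_iff (cs : List Char) :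
    0 < leadRun cs ↔ cs[0]? = some '#' := by
  cases cs with
  | nil => simp [leadRun]
  | cons c cs =>
    simp only [leadRun, List.getElem?_cons_zero]
    split <;> simp_all

theorem leadRun_tail (cs : List Char) (h : 0 < leadRun cs) :
    leadRun cs.tail = leadRun cs - 1 := by
  cases cs with
  | nil => simp [leadRun] at h
  | cons c cs =>
    simp only [leadRun, List.tail_cons] at *
    split at h
    · simp_all
    · omega

theorem leadRun_dropLast (cs : List Char) (h : leadRun cs < cs.length) :
    leadRun cs.dropLast = leadRun cs := by
  induction cs with
  | nil => rfl
  | cons c cs ih =>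
    cases cs with
    | nil =>
      simp only [leadRun, List.length_cons, List.length_nil] at h
      have : ¬ c = '#' := by by_contra hc; simp [hc] at h
      simp [leadRun, this]
    | cons d ds =>
      show leadRun (c :: (d :: ds).dropLast) = _
      simp only [leadRun] at *
      split
      · rw [ih (by simp only [List.length_cons] at h ⊢; split at h <;> omega)]
      · rfl

-- membership / extremal facts about Lmin and Rmin
theorem lmin_le (board : List String) (s : String) (hs : s ∈ board) :
    Lmin board ≤ leadRun s.toList :=
  minOf_le _ _ (List.mem_map.mpr ⟨s, hs, rfl⟩)

theorem rmin_le (board : List String) (s : String) (hs : s ∈ board) :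
    Rmin board ≤ trailRun (Lmin board) s.toList :=
  minOf_le _ _ (List.mem_map.mpr ⟨s, hs, rfl⟩)

theorem lmin_mem (board : List String) (h : board ≠ []) :
    ∃ s ∈ board, leadRun s.toList = Lmin board := by
  have := minOf_mem (board.map (fun s => leadRun s.toList)) (by simpa using h)
  obtain ⟨s, hs, he⟩ := List.mem_map.mp this
  exact ⟨s, hs, he⟩

theorem rmin_mem (board : List String) (h : board ≠ []) :
    ∃ s ∈ board, trailRun (Lmin board) s.toList = Rmin board := by
  have := minOf_mem (board.map (fun s => trailRun (Lmin board) s.toList)) (by simpa using h)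
  obtain ⟨s, hs, he⟩ := List.mem_map.mp this
  exact ⟨s, hs, he⟩

-- string-level bridges
theorem toList_f1 (s : String) : (PySem.Str.slice s (some 1) none).toList = s.toList.tail := by
  simp [PySem.Str.slice, PySem.List.slice_from_one]

theorem toList_f2 (s : String) : (PySem.Str.slice s none (some (-1))).toList = s.toList.dropLast :=
  PySem.Str.slice_to_neg_one s

theorem toList_sliceNat (s : String) (a b : Nat) :
    (PySem.Str.slice s (some (a : Int)) (some (b : Int))).toList = (s.toList.drop a).take (b - a) := by
  simp [PySem.Str.slice, PySem.List.slice_natCast]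

theorem trailRun_zero_pos_iff (cs : List Char) :
    0 < trailRun 0 cs ↔ cs.getLast? = some '#' := by
  rw [trailRun, List.drop_zero, leadRun_pos_iff, ← List.head?_eq_getElem?, List.head?_reverse]

-- guard evaluations
theorem guard1_true (board : List String) (h : ∀ s ∈ board, 0 < leadRun s.toList) :
    (board.all (fun line => PySem.Str.pyGet? line 0 == some '#')) = true := by
  rw [List.all_eq_true]
  intro s hs
  have := (leadRun_pos_iff s.toList).mp (h s hs)
  simp [PySem.Str.pyGet?, PySem.List.pyGet?_zero, this]

theorem guard1_false (board : List String) (s : String) (hs : s ∈ board)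
    (h0 : leadRun s.toList = 0) :
    (board.all (fun line => PySem.Str.pyGet? line 0 == some '#')) = false := by
  rw [List.all_eq_false]
  refine ⟨s, hs, ?_⟩
  have : ¬ s.toList[0]? = some '#' := fun hc => by
    have := (leadRun_pos_iff s.toList).mpr hc; omega
  simp [PySem.Str.pyGet?, PySem.List.pyGet?_zero, this]

theorem guard2_true (board : List String) (h : ∀ s ∈ board, 0 < trailRun 0 s.toList) :
    (board.all (fun line => PySem.Str.pyGet? line (-1) == some '#')) = true := by
  rw [List.all_eq_true]
  intro s hs
  have := (trailRun_zero_pos_iff s.toList).mp (h s hs)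
  simp [PySem.Str.pyGet?, PySem.List.pyGet?_neg_one, this]

theorem guard2_false (board : List String) (s : String) (hs : s ∈ board)
    (h0 : trailRun 0 s.toList = 0) :
    (board.all (fun line => PySem.Str.pyGet? line (-1) == some '#')) = false := by
  rw [List.all_eq_false]
  refine ⟨s, hs, ?_⟩
  have : ¬ s.toList.getLast? = some '#' := fun hc => by
    have := (trailRun_zero_pos_iff s.toList).mpr hc; omega
  simp [PySem.Str.pyGet?, PySem.List.pyGet?_neg_one, this]

-- how Lmin / Rmin move under the two column-stripping maps
theorem Lmin_tail (board : List String) (h : ∀ s ∈ board, 0 < leadRun s.toList) :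
    Lmin (board.map (fun line => PySem.Str.slice line (some 1) none)) = Lmin board - 1 := by
  unfold Lmin
  rw [List.map_map]
  have : board.map ((fun s => leadRun s.toList) ∘ (fun line => PySem.Str.slice line (some 1) none))
       = (board.map (fun s => leadRun s.toList)).map (fun x => x - 1) := by
    rw [List.map_map]
    apply List.map_congr_left
    intro s hs
    simp only [Function.comp]
    rw [toList_f1, leadRun_tail _ (h s hs)]
  rw [this, minOf_map_pred]

theorem Rmin_tail (board : List String) (h : ∀ s ∈ board, 0 < leadRun s.toList)
    (hL : 0 < Lmin board) :
    Rmin (board.map (fun line => PySem.Str.slice line (some 1) none)) = Rmin board := by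
  unfold Rmin
  rw [Lmin_tail board h, List.map_map]
  apply congrArg
  apply List.map_congr_left
  intro s hs
  simp only [Function.comp]
  rw [toList_f1, trailRun, trailRun]
  congr 2
  rw [← List.drop_one, List.drop_drop]
  rw [show 1 + (Lmin board - 1) = Lmin board by omega]

theorem Lmin_dropLast (board : List String) (hb : board ≠ []) (hL : Lmin board = 0)
    (hpre : ∀ s ∈ board, Lmin board + Rmin board < s.toList.length) :
    Lmin (board.map (fun line => PySem.Str.slice line none (some (-1)))) = 0 := by
  obtain ⟨s, hs, he⟩ := lmin_mem board hb
  have hlen : 0 < s.toList.length := by have := hpre s hs; omega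
  have h0 : leadRun (PySem.Str.slice s none (some (-1))).toList = 0 := by
    rw [toList_f2, leadRun_dropLast _ (by omega)]; omega
  have hmem : leadRun (PySem.Str.slice s none (some (-1))).toList
      ∈ (board.map (fun line => PySem.Str.slice line none (some (-1)))).map (fun s => leadRun s.toList) := by
    exact List.mem_map.mpr ⟨_, List.mem_map.mpr ⟨s, hs, rfl⟩, rfl⟩
  have := minOf_le _ _ hmem
  unfold Lmin
  omega

theorem Rmin_dropLast (board : List String) (hb : board ≠ []) (hL : Lmin board = 0)
    (hpre : ∀ s ∈ board, Lmin board + Rmin board < s.toList.length)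
    (h : ∀ s ∈ board, 0 < trailRun 0 s.toList) :
    Rmin (board.map (fun line => PySem.Str.slice line none (some (-1)))) = Rmin board - 1 := by
  unfold Rmin
  rw [Lmin_dropLast board hb hL hpre, List.map_map]
  have : board.map ((fun s => trailRun 0 s.toList) ∘ (fun line => PySem.Str.slice line none (some (-1))))
       = (board.map (fun s => trailRun 0 s.toList)).map (fun x => x - 1) := by
    rw [List.map_map]
    apply List.map_congr_left
    intro s hs
    simp only [Function.comp]
    have h' : 0 < leadRun s.toList.reverse := by
      have := h s hs; simpa [trailRun] using this
    rw [toList_f2, trailRun, trailRun, List.drop_zero, List.drop_zero,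
        ← List.tail_reverse, leadRun_tail _ h']
  rw [this, minOf_map_pred]
  unfold Lmin Rmin at *
  rw [hL]

-- cutdown_alt is unchanged by stripping one admissible column
theorem alt_tail (board : List String) (h : ∀ s ∈ board, 0 < leadRun s.toList)
    (hL : 0 < Lmin board)
    (hpre : ∀ s ∈ board, Lmin board + Rmin board < s.toList.length) :
    cutdown_alt (board.map (fun line => PySem.Str.slice line (some 1) none)) = cutdown_alt board := by
  unfold cutdown_alt
  rw [Lmin_tail board h, Rmin_tail board h hL, List.map_map]
  apply List.map_congr_left
  intro s hs
  simp only [Function.comp]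
  apply String.toList_inj.mp
  have hlen : (PySem.Str.slice s (some 1) none).toList.length = s.toList.length - 1 := by
    rw [toList_f1, List.length_tail]
  have hp := hpre s hs
  rw [show ((PySem.Str.slice s (some 1) none).toList.length : Int) - (Rmin board : Int)
      = ((s.toList.length - 1 - Rmin board : Nat) : Int) by rw [hlen]; omega,
      show ((s.toList.length : Int) - (Rmin board : Int)) = ((s.toList.length - Rmin board : Nat) : Int) by omega]
  rw [toList_sliceNat, toList_sliceNat, toList_f1, ← List.drop_one, List.drop_drop]
  rw [show 1 + (Lmin board - 1) = Lmin board by omega,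
      show s.toList.length - 1 - Rmin board - (Lmin board - 1)
         = s.toList.length - Rmin board - Lmin board by omega]

theorem alt_dropLast (board : List String) (hb : board ≠ []) (hL : Lmin board = 0)
    (hR : 0 < Rmin board)
    (hpre : ∀ s ∈ board, Lmin board + Rmin board < s.toList.length)
    (h : ∀ s ∈ board, 0 < trailRun 0 s.toList) :
    cutdown_alt (board.map (fun line => PySem.Str.slice line none (some (-1)))) = cutdown_alt board := by
  unfold cutdown_alt
  rw [Lmin_dropLast board hb hL hpre, Rmin_dropLast board hb hL hpre h, hL, List.map_map]
  apply List.map_congr_left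
  intro s hs
  simp only [Function.comp]
  apply String.toList_inj.mp
  have hp := hpre s hs
  have hlen : (PySem.Str.slice s none (some (-1))).toList.length = s.toList.length - 1 := by
    rw [toList_f2, List.length_dropLast]
  rw [show ((PySem.Str.slice s none (some (-1))).toList.length : Int) - ((Rmin board - 1 : Nat) : Int)
      = ((s.toList.length - Rmin board : Nat) : Int) by rw [hlen]; omega,
      show ((s.toList.length : Int) - (Rmin board : Int)) = ((s.toList.length - Rmin board : Nat) : Int) by omega]
  rw [toList_sliceNat, toList_sliceNat, toList_f2, List.dropLast_eq_take,
      List.drop_zero, List.drop_zero, List.take_take]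
  congr 1
  omega

theorem alt_id (board : List String) (hL : Lmin board = 0) (hR : Rmin board = 0) :
    cutdown_alt board = board := by
  unfold cutdown_alt
  rw [hL, hR]
  conv_rhs => rw [← List.map_id board]
  apply List.map_congr_left
  intro s hs
  apply String.toList_inj.mp
  rw [show ((s.toList.length : Int) - ((0 : Nat) : Int)) = ((s.toList.length : Nat) : Int) by omega]
  rw [toList_sliceNat]
  simp

theorem takeWhile_hash_eq_leadRun (cs : List Char) :
    (cs.takeWhile (· = '#')).length = leadRun cs := by
  induction cs with
  | nil => rfl
  | cons c cs ih => simp only [List.takeWhile, leadRun]; split <;> simp_all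

theorem min?_getD_eq_minOf (xs : List Nat) : xs.min?.getD 0 = minOf xs := by
  cases xs <;> rfl

theorem runL_eq_Lmin (board : List String) : runL board = Lmin board := by
  unfold runL Lmin
  rw [min?_getD_eq_minOf]
  congr 1
  exact List.map_congr_left (fun s _ => takeWhile_hash_eq_leadRun s.toList)

theorem runR_eq_Rmin (board : List String) : runR board = Rmin board := by
  unfold runR Rmin
  rw [min?_getD_eq_minOf]
  congr 1
  apply List.map_congr_left
  intro s _
  rw [runL_eq_Lmin, takeWhile_hash_eq_leadRun]
  rfl

theorem fuel_eq (n : Nat) : ∀ (board : List String), board ≠ [] →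
    (∀ s ∈ board, Lmin board + Rmin board < s.toList.length) →
    Lmin board + Rmin board ≤ n →
    cutdownFuel (n + 1) board = cutdown_alt board := by
  induction n with
  | zero =>
    intro board hb hpre hn
    have hL : Lmin board = 0 := by omega
    have hR : Rmin board = 0 := by omega
    obtain ⟨s0, hs0, he0⟩ := lmin_mem board hb
    obtain ⟨s1, hs1, he1⟩ := rmin_mem board hb
    rw [hL] at he1
    show (if _ then _ else if _ then _ else board) = _
    rw [guard1_false board s0 hs0 (by omega),
        guard2_false board s1 hs1 (by omega)]
    simp [alt_id board hL hR]
  | succ n ih =>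
    intro board hb hpre hn
    show (if _ then _ else if _ then _ else board) = _
    rcases Nat.eq_zero_or_pos (Lmin board) with hL | hL
    · rcases Nat.eq_zero_or_pos (Rmin board) with hR | hR
      · obtain ⟨s0, hs0, he0⟩ := lmin_mem board hb
        obtain ⟨s1, hs1, he1⟩ := rmin_mem board hb
        rw [hL] at he1
        rw [guard1_false board s0 hs0 (by omega),
            guard2_false board s1 hs1 (by omega)]
        simp [alt_id board hL hR]
      · -- strip the last column
        obtain ⟨s0, hs0, he0⟩ := lmin_mem board hb
        have htr : ∀ s ∈ board, 0 < trailRun 0 s.toList := by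
          intro s hs
          have := rmin_le board s hs
          rw [hL] at this
          omega
        rw [guard1_false board s0 hs0 (by omega), guard2_true board htr]
        simp only [Bool.false_eq_true, if_false, if_true]
        set board' := board.map (fun line => PySem.Str.slice line none (some (-1))) with hb'
        have hLd := Lmin_dropLast board hb hL hpre
        have hRd := Rmin_dropLast board hb hL hpre htr
        have hb'ne : board' ≠ [] := by
          rw [hb']; intro hc; exact hb (List.map_eq_nil_iff.mp hc)
        have hpre' : ∀ s ∈ board', Lmin board' + Rmin board' < s.toList.length := by
          intro s hs
          obtain ⟨t, ht, rfl⟩ := List.mem_map.mp hs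
          have := hpre t ht
          rw [hLd, hRd, toList_f2, List.length_dropLast]
          omega
        rw [ih board' hb'ne hpre' (by rw [hLd, hRd]; omega)]
        exact alt_dropLast board hb hL hR hpre htr
    · -- strip the first column
      have hlead : ∀ s ∈ board, 0 < leadRun s.toList := by
        intro s hs
        have := lmin_le board s hs
        omega
      rw [guard1_true board hlead]
      simp only [if_true]
      set board' := board.map (fun line => PySem.Str.slice line (some 1) none) with hb'
      have hLt := Lmin_tail board hlead
      have hRt := Rmin_tail board hlead hL
      have hb'ne : board' ≠ [] := by
        rw [hb']; intro hc; exact hb (List.map_eq_nil_iff.mp hc)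
      have hpre' : ∀ s ∈ board', Lmin board' + Rmin board' < s.toList.length := by
        intro s hs
        obtain ⟨t, ht, rfl⟩ := List.mem_map.mp hs
        have := hpre t ht
        rw [hLt, hRt, toList_f1, List.length_tail]
        omega
      rw [ih board' hb'ne hpre' (by rw [hLt, hRt]; omega)]
      exact alt_tail board hlead hL hpre

-- ===== VERDICT (by name: the statement is the Claim_ definition above) =====
theorem cutdown_spec : Claim_equal_cutdown := by
  intro board _ hpre
  obtain ⟨hb, hlen0⟩ := hpre
  have hlen : ∀ s ∈ board, Lmin board + Rmin board < s.toList.length := by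
    intro s hs
    have := hlen0 s hs
    rwa [runL_eq_Lmin, runR_eq_Rmin] at this
  unfold Spec_cutdown cutdown
  cases board with
  | nil => exact absurd rfl hb
  | cons s rest =>
    apply fuel_eq
    · exact hb
    · exact hlen
    · have hs : s ∈ s :: rest := List.mem_cons_self
      have h1 := hlen s hs
      have h2 : s.toList.length ≤ ((s :: rest).map (fun s => s.toList.length)).sum :=
        List.single_le_sum (by intro x _; omega) _ (List.mem_map.mpr ⟨s, hs, rfl⟩)
      omega
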